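-- pv_equiv track=rewrite | github.com/wookie184/markov-rhyming-poems | main.py | parse_rhyme_scheme
-- ===== SOURCE A (Python) =====
-- def parse_rhyme_scheme(scheme):
--     line_num = 0
--     rhyme_scheme = {}
--     break_lines = set()
--     for char in scheme:
--         if char == '/':
--             break_lines.add(line_num)
--             continue
--         rhyme_scheme.setdefault(char, []).append(line_num)
--         line_num += 1
--
--     rhyme_map = {}
--     for rhyme_group in rhyme_scheme.values():
--         for line, nxt in zip(rhyme_group, rhyme_group[1:]):
--             rhyme_map[line] = nxt
--     return line_num, rhyme_map, break_lines
-- ===== SOURCE B (Python) =====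
-- def parse_rhyme_scheme(scheme):
--     line_num = 0
--     lines = []          # (rhyme char, line number) for every real line
--     break_lines = set()
--     for char in scheme:
--         if char == '/':
--             break_lines.add(line_num)
--         else:
--             lines.append((char, line_num))
--             line_num += 1
--     rhyme_map = {}
--     done = set()
--     for char, _ in lines:
--         if char not in done:
--             done.add(char)
--             group = [line for c, line in lines if c == char]
--             for line, nxt in zip(group, group[1:]):
--                 rhyme_map[line] = nxt
--     return line_num, rhyme_map, break_lines
-- ===== Notes on version B (the rewrite author's own statement) =====
-- stated objective: alternative
-- what changed: Instead of indexing occurrence lists in a dict of lists and then zipping each list, B records the (char, line) pairs once and, for each distinct rhyme character in first-appearance order, rescans that list to link its consecutive lines.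
import Mathlib
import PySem

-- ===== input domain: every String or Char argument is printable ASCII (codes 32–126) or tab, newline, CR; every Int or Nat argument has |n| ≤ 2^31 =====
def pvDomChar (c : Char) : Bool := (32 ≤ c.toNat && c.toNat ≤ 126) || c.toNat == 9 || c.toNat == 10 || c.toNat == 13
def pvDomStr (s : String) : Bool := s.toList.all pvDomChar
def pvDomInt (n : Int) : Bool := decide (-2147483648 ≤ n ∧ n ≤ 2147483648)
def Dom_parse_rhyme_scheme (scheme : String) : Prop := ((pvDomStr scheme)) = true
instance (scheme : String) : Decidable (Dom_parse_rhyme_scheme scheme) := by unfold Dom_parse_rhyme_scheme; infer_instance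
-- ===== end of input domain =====

-- B replaces A's dict-of-occurrence-lists index with a recorded (char, line) list that is
-- rescanned per distinct rhyme character to link its consecutive lines (objective: alternative).

-- linking loop 'for line, nxt in zip(group, group[1:]): rhyme_map[line] = nxt' (literally in both Pythons)
def pvLinkPairs (rm : PySem.Dict Int Int) (g : List Int) : PySem.Dict Int Int :=
  (g.zip (PySem.List.slice g (some 1) none)).foldl (fun rm p => rm.insert p.1 p.2) rm

-- ===== PORT A =====
-- first loop's state: (line_num, rhyme_scheme, break_lines)
def pvStepA (st : Int × PySem.Dict Char (List Int) × PySem.Set Int) (char : Char) :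
    Int × PySem.Dict Char (List Int) × PySem.Set Int :=
  if char = '/' then (st.1, st.2.1, PySem.Set.add st.2.2 st.1)
  else (st.1 + 1, PySem.Dict.modify st.2.1 char [] (· ++ [st.1]), st.2.2)
    -- rhyme_scheme.setdefault(char, []).append(line_num)  ==  d[char] = d.get(char, []) + [line_num]

def parse_rhyme_scheme (scheme : String) : Int × (List (Int × Int)) × List Int :=
  let st := scheme.toList.foldl pvStepA (0, PySem.Dict.empty, PySem.Set.empty)
  let rhyme_map := st.2.1.values.foldl pvLinkPairs PySem.Dict.empty
  (st.1, rhyme_map.items, st.2.2)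

-- ===== PORT B =====
-- first loop's state: (line_num, lines, break_lines)
def pvStepB1 (st : Int × List (Char × Int) × PySem.Set Int) (char : Char) :
    Int × List (Char × Int) × PySem.Set Int :=
  if char = '/' then (st.1, st.2.1, PySem.Set.add st.2.2 st.1)
  else (st.1 + 1, st.2.1 ++ [(char, st.1)], st.2.2)

-- group = [line for c, line in lines if c == char]
def pvGroup (lines : List (Char × Int)) (char : Char) : List Int :=
  (lines.filter (fun p => p.1 == char)).map (·.2)

-- second loop's state: (rhyme_map, done)
def pvStepB2 (lines : List (Char × Int)) (st : PySem.Dict Int Int × PySem.Set Char)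
    (p : Char × Int) : PySem.Dict Int Int × PySem.Set Char :=
  if PySem.Set.contains st.2 p.1 then st
  else (pvLinkPairs st.1 (pvGroup lines p.1), PySem.Set.add st.2 p.1)

def parse_rhyme_scheme_alt (scheme : String) : Int × (List (Int × Int)) × List Int :=
  let st := scheme.toList.foldl pvStepB1 (0, [], PySem.Set.empty)
  let rhyme_map := (st.2.1.foldl (pvStepB2 st.2.1) (PySem.Dict.empty, PySem.Set.empty)).1
  (st.1, rhyme_map.items, st.2.2)

-- ===== PRECONDITION & SPEC =====
def Spec_parse_rhyme_scheme (scheme : String) (out : Int × (List (Int × Int)) × List Int) : Prop := out = parse_rhyme_scheme_alt scheme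
instance (scheme : String) (out : Int × (List (Int × Int)) × List Int) : Decidable (Spec_parse_rhyme_scheme scheme out) := by unfold Spec_parse_rhyme_scheme; infer_instance

-- ===== CLAIM (what is proved, stated in full; the proofs are below) =====
def Claim_equal_parse_rhyme_scheme : Prop := ∀ (scheme : String), Dom_parse_rhyme_scheme scheme → Spec_parse_rhyme_scheme scheme (parse_rhyme_scheme scheme)

-- ===== LEMMAS AND PROOFS =====

-- A's first loop builds exactly the dict indexed from B's recorded lines
def pvBuild (l : List (Char × Int)) : PySem.Dict Char (List Int) :=
  l.foldl (fun d p => d.modify p.1 [] (· ++ [p.2])) PySem.Dict.empty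

lemma pvFold1 (cs : List Char) (n : Int) (l : List (Char × Int)) (bk : PySem.Set Int) :
    cs.foldl pvStepA (n, pvBuild l, bk) =
      ((cs.foldl pvStepB1 (n, l, bk)).1,
        pvBuild (cs.foldl pvStepB1 (n, l, bk)).2.1,
        (cs.foldl pvStepB1 (n, l, bk)).2.2) := by
  induction cs generalizing n l bk with
  | nil => rfl
  | cons c t ih =>
    simp only [List.foldl_cons]
    by_cases hc : c = '/'
    · rw [show pvStepA (n, pvBuild l, bk) c = (n, pvBuild l, PySem.Set.add bk n) by
          simp [pvStepA, hc],
        show pvStepB1 (n, l, bk) c = (n, l, PySem.Set.add bk n) by simp [pvStepB1, hc]]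
      exact ih n l _
    · rw [show pvStepA (n, pvBuild l, bk) c
            = (n + 1, pvBuild (l ++ [(c, n)]), bk) by
          simp [pvStepA, hc, pvBuild, List.foldl_append],
        show pvStepB1 (n, l, bk) c = (n + 1, l ++ [(c, n)], bk) by simp [pvStepB1, hc]]
      exact ih (n + 1) (l ++ [(c, n)]) bk

-- the distinct characters a seen-set loop acts on, in order
def pvFirstsAux (s : List Char) : List Char → List Char
  | [] => []
  | c :: t => if c ∈ s then pvFirstsAux s t else c :: pvFirstsAux (s ++ [c]) t

lemma pvFoldAdd (xs : List Char) : ∀ (s : PySem.Set Char),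
    xs.foldl PySem.Set.add s = s ++ pvFirstsAux s xs := by
  induction xs with
  | nil => intro s; simp [pvFirstsAux]
  | cons c t ih =>
    intro s
    by_cases hc : c ∈ s
    · have : PySem.Set.add s c = s := by
        simp [PySem.Set.add, PySem.Set.contains, hc]
      simp [pvFirstsAux, hc, ih]
    · have : PySem.Set.add s c = s ++ [c] := by
        simp [PySem.Set.add, PySem.Set.contains, hc]
      simp [pvFirstsAux, hc, ih]

-- B's second loop acts once per distinct character, in first-appearance order
lemma pvFold2 (lines : List (Char × Int)) (t : List (Char × Int)) :
    ∀ (rm : PySem.Dict Int Int) (s : PySem.Set Char),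
    (t.foldl (pvStepB2 lines) (rm, s)).1 =
      (pvFirstsAux s (t.map Prod.fst)).foldl (fun rm c => pvLinkPairs rm (pvGroup lines c)) rm := by
  induction t with
  | nil => intro rm s; rfl
  | cons p t ih =>
    intro rm s
    by_cases hc : p.1 ∈ s
    · have hstep : pvStepB2 lines (rm, s) p = (rm, s) := by
        simp [pvStepB2, PySem.Set.contains, hc]
      simp only [List.foldl_cons, hstep, List.map_cons, pvFirstsAux, if_pos hc]
      exact ih rm s
    · have hstep : pvStepB2 lines (rm, s) p
          = (pvLinkPairs rm (pvGroup lines p.1), s ++ [p.1]) := by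
        simp [pvStepB2, PySem.Set.contains, PySem.Set.add, hc]
      simp only [List.foldl_cons, hstep, List.map_cons, pvFirstsAux, if_neg hc]
      exact ih _ _

-- the values of A's dict are the per-character groups of B, in the same order
lemma pvBuild_values (l : List (Char × Int)) :
    (pvBuild l).values = (pvFirstsAux [] (l.map Prod.fst)).map (pvGroup l) := by
  have hnd : (pvBuild l).keys.Nodup :=
    PySem.Dict.nodup_keys_foldl_modify_key l Prod.fst [] (fun _ p => (· ++ [p.2])) _
      PySem.Dict.nodup_keys_empty
  have hkeys : (pvBuild l).keys = pvFirstsAux [] (l.map Prod.fst) := by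
    rw [show (pvBuild l).keys
        = PySem.Set.update (PySem.Dict.empty : PySem.Dict Char (List Int)).keys (l.map Prod.fst) from
        PySem.Dict.keys_foldl_modify_key l Prod.fst [] (fun _ p => (· ++ [p.2])) _]
    rw [PySem.Dict.keys_empty, PySem.Set.update_nil_left, PySem.Set.ofList_eq_foldl, pvFoldAdd]
    simp
  have hgetD : ∀ c, (pvBuild l).getD c [] = pvGroup l c := by
    intro c
    unfold pvBuild pvGroup
    rw [PySem.Dict.getD_foldl_modify_append, PySem.Dict.getD_empty]
    simp
  rw [PySem.Dict.values_eq_map_keys _ hnd ([] : List Int), hkeys]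
  exact List.map_congr_left fun c _ => hgetD c

-- ===== VERDICT (by name: the statement is the Claim_ definition above) =====
theorem parse_rhyme_scheme_spec : Claim_equal_parse_rhyme_scheme := by
  intro scheme _
  unfold Spec_parse_rhyme_scheme parse_rhyme_scheme parse_rhyme_scheme_alt
  have h1 := pvFold1 scheme.toList 0 [] PySem.Set.empty
  rw [show pvBuild [] = PySem.Dict.empty from rfl] at h1
  rw [h1]
  set stB := scheme.toList.foldl pvStepB1 (0, [], PySem.Set.empty) with hstB
  dsimp only
  refine congrArg₂ Prod.mk rfl (congrArg₂ Prod.mk ?_ rfl)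
  refine congrArg PySem.Dict.items ?_
  rw [pvBuild_values, List.foldl_map, pvFold2]
  rfl
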